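-- pv_equiv track=rewrite | github.com/jbasalone/erpg_dungeon_helper | dungeon_helpers/dungeon12.py | get_pos_from_moves
-- ===== SOURCE A (Python) =====
-- def get_pos_from_moves(start_x, start_y, moves, up_to):
--     x, y = start_x, start_y
--     for move in moves[:up_to]:
--         if move.upper() == 'UP':
--             y -= 1
--         elif move.upper() == 'DOWN':
--             y += 1
--         elif move.upper() == 'LEFT':
--             x -= 1
--         elif move.upper() == 'RIGHT':
--             x += 1
--     return x, y
-- ===== SOURCE B (Python) =====
-- _DELTA = {'UP': (0, -1), 'DOWN': (0, 1), 'LEFT': (-1, 0), 'RIGHT': (1, 0)}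
--
-- def _disp(ms):
--     # Net displacement of a move list by divide and conquer: displacements
--     # compose additively, so split in half, recurse, and add the two vectors.
--     if len(ms) <= 1:
--         return (0, 0) if not ms else _DELTA.get(ms[0].upper(), (0, 0))
--     mid = len(ms) // 2
--     ax, ay = _disp(ms[:mid])
--     bx, by = _disp(ms[mid:])
--     return (ax + bx, ay + by)
--
-- def get_pos_from_moves(start_x, start_y, moves, up_to):
--     dx, dy = _disp(moves[:up_to])
--     return (start_x + dx, start_y + dy)
-- ===== Notes on version B (the rewrite author's own statement) =====
-- stated objective: alternative
-- what changed: Replaces the per-step branch-and-accumulate loop with a divide-and-conquer recursion: each move maps to a displacement vector through a lookup table and halves of the prefix are solved recursively and combined by vector addition, exploiting that displacements compose additively.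
import Mathlib
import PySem

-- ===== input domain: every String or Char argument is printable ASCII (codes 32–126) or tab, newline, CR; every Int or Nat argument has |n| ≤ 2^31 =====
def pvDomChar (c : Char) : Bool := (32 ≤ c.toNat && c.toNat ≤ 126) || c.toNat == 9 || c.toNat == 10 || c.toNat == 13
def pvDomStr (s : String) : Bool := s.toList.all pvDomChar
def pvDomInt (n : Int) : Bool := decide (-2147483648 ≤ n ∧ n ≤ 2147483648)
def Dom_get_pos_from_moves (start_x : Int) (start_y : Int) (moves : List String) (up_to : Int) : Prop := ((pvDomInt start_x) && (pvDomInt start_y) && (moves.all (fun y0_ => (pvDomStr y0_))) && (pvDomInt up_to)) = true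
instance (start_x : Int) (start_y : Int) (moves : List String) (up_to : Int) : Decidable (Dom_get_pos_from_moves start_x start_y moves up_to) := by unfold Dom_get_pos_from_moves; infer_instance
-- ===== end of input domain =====

-- B replaces A's per-step branch-and-accumulate loop by a divide-and-conquer recursion over
-- the prefix: each move is mapped to a displacement vector by a table and the half-list
-- displacements are added (alternative decomposition, same cost).

-- ===== PORT A =====
def get_pos_from_moves (start_x : Int) (start_y : Int) (moves : List String) (up_to : Int) : Int × Int :=
  (PySem.List.slice moves none (some up_to)).foldl
    (fun (xy : Int × Int) move =>
      if PySem.Str.upper move = "UP" then (xy.1, xy.2 - 1)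
      else if PySem.Str.upper move = "DOWN" then (xy.1, xy.2 + 1)
      else if PySem.Str.upper move = "LEFT" then (xy.1 - 1, xy.2)
      else if PySem.Str.upper move = "RIGHT" then (xy.1 + 1, xy.2)
      else xy)
    (start_x, start_y)

-- ===== PORT B =====
-- _DELTA table of Source B
def pvDelta (m : String) : Int × Int :=
  (PySem.Dict.ofList [("UP", ((0 : Int), (-1 : Int))), ("DOWN", (0, 1)), ("LEFT", (-1, 0)), ("RIGHT", (1, 0))]).getD
    (PySem.Str.upper m) (0, 0)

-- _disp of Source B: divide-and-conquer net displacement (ms[:mid] / ms[mid:] ported by the slices)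
def pvDisp (ms : List String) : Int × Int :=
  if _h : ms.length ≤ 1 then
    match ms with
    | [] => (0, 0)
    | m :: _ => pvDelta m
  else
    let mid : Nat := ms.length / 2
    let a := pvDisp (PySem.List.slice ms none (some (mid : Int)))
    let b := pvDisp (PySem.List.slice ms (some (mid : Int)) none)
    (a.1 + b.1, a.2 + b.2)
termination_by ms.length
decreasing_by
  · rw [PySem.List.slice_to_natCast]
    simp only [List.length_take]
    omega
  · rw [PySem.List.slice_from_natCast]
    simp only [List.length_drop]
    omega

def get_pos_from_moves_alt (start_x : Int) (start_y : Int) (moves : List String) (up_to : Int) : Int × Int :=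
  let d := pvDisp (PySem.List.slice moves none (some up_to))
  (start_x + d.1, start_y + d.2)

-- ===== PRECONDITION & SPEC =====
def Spec_get_pos_from_moves (start_x : Int) (start_y : Int) (moves : List String) (up_to : Int) (out : Int × Int) : Prop := out = get_pos_from_moves_alt start_x start_y moves up_to
instance (start_x : Int) (start_y : Int) (moves : List String) (up_to : Int) (out : Int × Int) : Decidable (Spec_get_pos_from_moves start_x start_y moves up_to out) := by unfold Spec_get_pos_from_moves; infer_instance

-- ===== CLAIM (what is proved, stated in full; the proofs are below) =====
def Claim_equal_get_pos_from_moves : Prop := ∀ (start_x : Int) (start_y : Int) (moves : List String) (up_to : Int), Dom_get_pos_from_moves start_x start_y moves up_to → Spec_get_pos_from_moves start_x start_y moves up_to (get_pos_from_moves start_x start_y moves up_to)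

-- ===== LEMMAS AND PROOFS =====

-- A's branch step adds exactly B's table delta.
theorem a_step_delta (m : String) (xy : Int × Int) :
    (if PySem.Str.upper m = "UP" then (xy.1, xy.2 - 1)
     else if PySem.Str.upper m = "DOWN" then (xy.1, xy.2 + 1)
     else if PySem.Str.upper m = "LEFT" then (xy.1 - 1, xy.2)
     else if PySem.Str.upper m = "RIGHT" then (xy.1 + 1, xy.2)
     else xy)
    = (xy.1 + (pvDelta m).1, xy.2 + (pvDelta m).2) := by
  have htab : (PySem.Dict.ofList [("UP", ((0 : Int), (-1 : Int))), ("DOWN", (0, 1)), ("LEFT", (-1, 0)), ("RIGHT", (1, 0))])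
      = PySem.Dict.mk [("UP", ((0 : Int), (-1 : Int))), ("DOWN", (0, 1)), ("LEFT", (-1, 0)), ("RIGHT", (1, 0))] := by decide
  unfold pvDelta
  rw [htab]
  by_cases h1 : PySem.Str.upper m = "UP"
  · simp [h1, PySem.Dict.getD_eq_get?_getD, PySem.Dict.get?_mk_cons]; omega
  by_cases h2 : PySem.Str.upper m = "DOWN"
  · simp [h2, PySem.Dict.getD_eq_get?_getD, PySem.Dict.get?_mk_cons]
  by_cases h3 : PySem.Str.upper m = "LEFT"
  · simp [h3, PySem.Dict.getD_eq_get?_getD, PySem.Dict.get?_mk_cons]; omega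
  by_cases h4 : PySem.Str.upper m = "RIGHT"
  · simp [h4, PySem.Dict.getD_eq_get?_getD, PySem.Dict.get?_mk_cons]
  · have e1 : ("UP" == PySem.Str.upper m) = false := by simpa using fun h => h1 h.symm
    have e2 : ("DOWN" == PySem.Str.upper m) = false := by simpa using fun h => h2 h.symm
    have e3 : ("LEFT" == PySem.Str.upper m) = false := by simpa using fun h => h3 h.symm
    have e4 : ("RIGHT" == PySem.Str.upper m) = false := by simpa using fun h => h4 h.symm
    simp [PySem.Dict.getD_eq_get?_getD, e1, e2, e3, e4, PySem.Dict.get?, h1, h2, h3, h4]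

-- B's divide-and-conquer displacement is the sum of the per-move deltas.
theorem pvDisp_eq_sum (ms : List String) : pvDisp ms = (ms.map pvDelta).sum := by
  induction hn : ms.length using Nat.strong_induction_on generalizing ms with
  | _ n ih =>
    rw [pvDisp]
    by_cases h : ms.length ≤ 1
    · subst hn
      match ms, h with
      | [], _ => simp
      | [m], _ => simp
    · simp only [dif_neg h]
      rw [PySem.List.slice_to_natCast, PySem.List.slice_from_natCast]
      rw [ih _ (by subst hn; simp only [List.length_take]; omega) _ rfl,
          ih _ (by subst hn; simp only [List.length_drop]; omega) _ rfl]
      have : ms = ms.take (ms.length / 2) ++ ms.drop (ms.length / 2) := by simp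
      conv_rhs => rw [this]
      rw [List.map_append, List.sum_append]
      rfl

-- A's fold adds the total delta sum to the start position.
theorem a_fold_sum (l : List String) (x y : Int) :
    l.foldl
      (fun (xy : Int × Int) move =>
        if PySem.Str.upper move = "UP" then (xy.1, xy.2 - 1)
        else if PySem.Str.upper move = "DOWN" then (xy.1, xy.2 + 1)
        else if PySem.Str.upper move = "LEFT" then (xy.1 - 1, xy.2)
        else if PySem.Str.upper move = "RIGHT" then (xy.1 + 1, xy.2)
        else xy)
      (x, y)
    = (x + ((l.map pvDelta).sum).1, y + ((l.map pvDelta).sum).2) := by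
  induction l generalizing x y with
  | nil => simp
  | cons m t ih =>
    simp only [List.foldl_cons, List.map_cons, List.sum_cons]
    rw [a_step_delta m (x, y), ih]
    simp [Prod.fst_add, Prod.snd_add]
    constructor <;> ring

-- ===== VERDICT (by name: the statement is the Claim_ definition above) =====
theorem get_pos_from_moves_spec : Claim_equal_get_pos_from_moves := by
  intro sx sy mv u _
  unfold Spec_get_pos_from_moves get_pos_from_moves get_pos_from_moves_alt
  rw [a_fold_sum, pvDisp_eq_sum]
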